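-- pv_equiv track=rewrite | github.com/Venkateshwaran-Sivaramakrishnan/ML-Placement-Initialization | scripts/mapping/compute_hierarchy_connectivity.py | build_node_connectivity_map
-- ===== SOURCE A (Python) =====
-- from collections import defaultdict
--
-- def build_node_connectivity_map(hypergraph):
--     connectivity_map = defaultdict(set)
--     for driver, sinks in hypergraph.items():
--         all_nodes = [driver] + sinks
--         for node in all_nodes:
--             others = [n for n in all_nodes if n != node]
--             connectivity_map[node].update(others)
--     return {k: sorted(v) for k, v in connectivity_map.items()}
-- ===== SOURCE B (Python) =====
-- def build_node_connectivity_map(hypergraph):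
--     nets = [[driver] + sinks for driver, sinks in hypergraph.items()]
--     keys = list(dict.fromkeys(node for net in nets for node in net))
--     return {
--         k: sorted({node for net in nets if k in net for node in net} - {k})
--         for k in keys
--     }
-- ===== Notes on version B (the rewrite author's own statement) =====
-- stated objective: alternative
-- what changed: A makes one net-major pass incrementally uniting each net into a per-node set dict; B keeps no incremental state: it lists the distinct nodes once (dict.fromkeys) and computes each node's neighborhood independently as a comprehension over the nets that contain it.
import Mathlib
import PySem

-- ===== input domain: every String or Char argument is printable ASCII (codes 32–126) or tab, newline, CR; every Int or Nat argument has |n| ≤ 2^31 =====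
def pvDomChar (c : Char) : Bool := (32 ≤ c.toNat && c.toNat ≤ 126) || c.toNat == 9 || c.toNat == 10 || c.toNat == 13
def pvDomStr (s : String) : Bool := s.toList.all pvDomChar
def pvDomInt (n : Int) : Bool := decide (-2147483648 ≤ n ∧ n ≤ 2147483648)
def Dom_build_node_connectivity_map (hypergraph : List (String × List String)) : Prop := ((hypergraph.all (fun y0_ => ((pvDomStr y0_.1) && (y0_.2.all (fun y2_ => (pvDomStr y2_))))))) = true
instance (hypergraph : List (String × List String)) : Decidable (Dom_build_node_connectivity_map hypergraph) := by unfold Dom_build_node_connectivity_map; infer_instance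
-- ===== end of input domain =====

-- B replaces A's net-major incremental dict of neighbor sets by a node-major, non-incremental
-- computation: list the distinct nodes once, then for each node gather its neighborhood by
-- filtering the nets that contain it (alternative; return value only).

-- ===== PORT A =====
def build_node_connectivity_map (hypergraph : List (String × List String)) : List (String × List String) :=
  let connectivity_map : PySem.Dict String (PySem.Set String) :=
    hypergraph.foldl (fun connectivity_map ds =>
      let all_nodes := ds.1 :: ds.2
      all_nodes.foldl (fun connectivity_map node =>
        let others := all_nodes.filter (fun n => n ≠ node)
        connectivity_map.insert node
          (PySem.Set.update (connectivity_map.getD node PySem.Set.empty) others)) connectivity_map)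
      PySem.Dict.empty
  connectivity_map.items.map (fun kv => (kv.1, PySem.List.sorted kv.2 (fun x => x)))

-- ===== PORT B =====
def build_node_connectivity_map_alt (hypergraph : List (String × List String)) : List (String × List String) :=
  let nets := hypergraph.map (fun ds => ds.1 :: ds.2)
  let keys := PySem.List.dedup (nets.flatMap (fun net => net))
  keys.map (fun k =>
    (k, PySem.List.sorted
          (PySem.Set.discard
            (PySem.Set.ofList ((nets.filter (fun net => net.contains k)).flatMap (fun net => net))) k)
          (fun x => x)))

-- ===== PRECONDITION & SPEC =====
def Spec_build_node_connectivity_map (hypergraph : List (String × List String)) (out : List (String × List String)) : Prop := out = build_node_connectivity_map_alt hypergraph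
instance (hypergraph : List (String × List String)) (out : List (String × List String)) : Decidable (Spec_build_node_connectivity_map hypergraph out) := by unfold Spec_build_node_connectivity_map; infer_instance

-- ===== CLAIM (what is proved, stated in full; the proofs are below) =====
def Claim_equal_build_node_connectivity_map : Prop := ∀ (hypergraph : List (String × List String)), Dom_build_node_connectivity_map hypergraph → Spec_build_node_connectivity_map hypergraph (build_node_connectivity_map hypergraph)

-- ===== LEMMAS AND PROOFS =====

-- A's inner loop over one net: value sets stay duplicate-free, and membership grows by
-- exactly 'k was processed and x is another node of the net'.
lemma pvInner (all l : List String) (d : PySem.Dict String (PySem.Set String))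
    (hv : ∀ k : String, (d.getD k PySem.Set.empty).Nodup) :
    (∀ k : String,
      ((l.foldl (fun d node =>
          d.insert node (PySem.Set.update (d.getD node PySem.Set.empty)
            (all.filter (fun n => n ≠ node)))) d).getD k PySem.Set.empty).Nodup) ∧
    (∀ k x : String,
      x ∈ (l.foldl (fun d node =>
          d.insert node (PySem.Set.update (d.getD node PySem.Set.empty)
            (all.filter (fun n => n ≠ node)))) d).getD k PySem.Set.empty ↔
        x ∈ d.getD k PySem.Set.empty ∨ (k ∈ l ∧ x ∈ all ∧ x ≠ k)) := by
  induction l generalizing d with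
  | nil => exact ⟨hv, fun k x => by simp⟩
  | cons n t ih =>
    have hv1 : ∀ k : String,
        ((d.insert n (PySem.Set.update (d.getD n PySem.Set.empty)
          (all.filter (fun m => m ≠ n)))).getD k PySem.Set.empty).Nodup := by
      intro k
      rw [PySem.Dict.getD_insert]
      split_ifs with h
      · exact PySem.Set.nodup_update _ _ (hv n)
      · exact hv k
    obtain ⟨ihA, ihB⟩ := ih (d.insert n (PySem.Set.update (d.getD n PySem.Set.empty)
      (all.filter (fun m => m ≠ n)))) hv1
    simp only [List.foldl_cons] at ihA ihB ⊢
    refine ⟨ihA, ?_⟩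
    intro k x
    rw [ihB k x, PySem.Dict.getD_insert]
    by_cases hkn : k = n
    · subst hkn
      simp only [if_true, PySem.Set.mem_update, List.mem_filter, List.mem_cons,
        decide_eq_true_eq]
      constructor
      · rintro ((h | ⟨h1, h2⟩) | ⟨h1, h2, h3⟩) <;> tauto
      · rintro (h | ⟨h1, h2, h3⟩) <;> tauto
    · simp only [if_neg hkn, List.mem_cons]
      constructor
      · rintro (h | ⟨h1, h2, h3⟩) <;> tauto
      · rintro (h | ⟨h1 | h1, h2, h3⟩)
        · tauto
        · exact absurd h1 hkn
        · tauto

-- A's outer loop: value sets are duplicate-free and x is a neighbour of k iff some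
-- processed net contains both, x ≠ k.
lemma pvOuter (hg : List (String × List String)) (d : PySem.Dict String (PySem.Set String))
    (hv : ∀ k : String, (d.getD k PySem.Set.empty).Nodup) :
    (∀ k : String,
      ((hg.foldl (fun d ds =>
          (ds.1 :: ds.2).foldl (fun d node =>
            d.insert node (PySem.Set.update (d.getD node PySem.Set.empty)
              ((ds.1 :: ds.2).filter (fun n => n ≠ node)))) d) d).getD k PySem.Set.empty).Nodup) ∧
    (∀ k x : String,
      x ∈ (hg.foldl (fun d ds =>
          (ds.1 :: ds.2).foldl (fun d node =>
            d.insert node (PySem.Set.update (d.getD node PySem.Set.empty)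
              ((ds.1 :: ds.2).filter (fun n => n ≠ node)))) d) d).getD k PySem.Set.empty ↔
        x ∈ d.getD k PySem.Set.empty ∨
          ∃ ds ∈ hg, k ∈ ds.1 :: ds.2 ∧ x ∈ ds.1 :: ds.2 ∧ x ≠ k) := by
  induction hg generalizing d with
  | nil => exact ⟨hv, fun k x => by simp⟩
  | cons p t ih =>
    obtain ⟨h1, h2⟩ := pvInner (p.1 :: p.2) (p.1 :: p.2) d hv
    obtain ⟨ihA, ihB⟩ := ih ((p.1 :: p.2).foldl (fun d node =>
      d.insert node (PySem.Set.update (d.getD node PySem.Set.empty)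
        ((p.1 :: p.2).filter (fun n => n ≠ node)))) d) h1
    simp only [List.foldl_cons] at ihA ihB h1 h2 ⊢
    refine ⟨ihA, ?_⟩
    intro k x
    rw [ihB k x, h2 k x]
    simp only [List.mem_cons]
    constructor
    · rintro ((h | h) | ⟨ds, hds, hP⟩)
      · exact Or.inl h
      · exact Or.inr ⟨p, Or.inl rfl, h⟩
      · exact Or.inr ⟨ds, Or.inr hds, hP⟩
    · rintro (h | ⟨ds, (rfl | hds), hP⟩)
      · exact Or.inl (Or.inl h)
      · exact Or.inl (Or.inr hP)
      · exact Or.inr ⟨ds, hds, hP⟩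

-- The keys of A's dict, in order, are the distinct nodes in first-occurrence order.
lemma pvKeys (hg : List (String × List String)) (d : PySem.Dict String (PySem.Set String)) :
    (hg.foldl (fun d ds =>
        (ds.1 :: ds.2).foldl (fun d node =>
          d.insert node (PySem.Set.update (d.getD node PySem.Set.empty)
            ((ds.1 :: ds.2).filter (fun n => n ≠ node)))) d) d).keys
      = PySem.Set.update d.keys (hg.flatMap (fun ds => ds.1 :: ds.2)) := by
  induction hg generalizing d with
  | nil => simp [PySem.Set.update]
  | cons p t ih =>
    rw [List.foldl_cons, ih, List.flatMap_cons, PySem.Set.update_append,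
      PySem.Dict.keys_foldl_insert]

lemma pvKeysNodup (hg : List (String × List String)) (d : PySem.Dict String (PySem.Set String))
    (h : d.keys.Nodup) :
    (hg.foldl (fun d ds =>
        (ds.1 :: ds.2).foldl (fun d node =>
          d.insert node (PySem.Set.update (d.getD node PySem.Set.empty)
            ((ds.1 :: ds.2).filter (fun n => n ≠ node)))) d) d).keys.Nodup := by
  induction hg generalizing d with
  | nil => exact h
  | cons p t ih =>
    rw [List.foldl_cons]
    exact ih _ (PySem.Dict.nodup_keys_foldl_insert _ _ _ h)

-- ===== VERDICT (by name: the statement is the Claim_ definition above) =====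
theorem build_node_connectivity_map_spec : Claim_equal_build_node_connectivity_map := by
  intro hg _
  simp only [Spec_build_node_connectivity_map, build_node_connectivity_map,
    build_node_connectivity_map_alt]
  obtain ⟨hnd, hmem⟩ := pvOuter hg PySem.Dict.empty
    (fun k => by simp [PySem.Dict.getD_empty, PySem.Set.empty])
  have hkeysnd : (hg.foldl _ PySem.Dict.empty).keys.Nodup :=
    pvKeysNodup hg PySem.Dict.empty (by simp [PySem.Dict.keys_empty])
  rw [PySem.Dict.items_eq_map_keys _ hkeysnd PySem.Set.empty, List.map_map]
  have hkeys : (hg.foldl (fun d ds =>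
      (ds.1 :: ds.2).foldl (fun d node =>
        d.insert node (PySem.Set.update (d.getD node PySem.Set.empty)
          ((ds.1 :: ds.2).filter (fun n => n ≠ node)))) d) PySem.Dict.empty).keys
      = PySem.List.dedup ((hg.map (fun ds => ds.1 :: ds.2)).flatMap (fun net => net)) := by
    rw [pvKeys hg PySem.Dict.empty, PySem.List.dedup_eq_ofList, List.flatMap_map,
      PySem.Dict.keys_empty, PySem.Set.update_nil_left]
  rw [hkeys]
  refine List.map_congr_left ?_
  intro k hkmem
  simp only [Function.comp]
  refine congrArg (fun v => (k, v)) ?_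
  refine PySem.List.sorted_eq_sorted_of_perm _ _ (fun x => x) (fun a b h => h) ?_
  rw [List.perm_ext_iff_of_nodup (hnd k)
    (PySem.Set.nodup_discard _ _ (PySem.Set.nodup_ofList _))]
  intro x
  rw [hmem k x, PySem.Set.mem_discard, PySem.Set.mem_ofList, List.mem_flatMap]
  simp only [PySem.Dict.getD_empty, List.mem_filter, List.mem_map,
    List.contains_iff_mem]
  constructor
  · rintro (h | ⟨ds, hds, hk, hx, hne⟩)
    · simp [PySem.Set.empty] at h
    · exact ⟨⟨ds.1 :: ds.2, ⟨⟨ds, hds, rfl⟩, by simpa using hk⟩, hx⟩, hne⟩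
  · rintro ⟨⟨net, ⟨⟨ds, hds, rfl⟩, hk⟩, hx⟩, hne⟩
    exact Or.inr ⟨ds, hds, by simpa using hk, hx, hne⟩
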